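-- pv_equiv track=rewrite | github.com/SkyyRoseLLC/DevSkyy | agent/modules/scanner.py | _analyze_css_file
-- ===== SOURCE A (Python) =====
-- from typing import Dict, Any, List, Optional, Callable
--
-- def _analyze_css_file(content: str, file_path: str) -> Dict[str, Any]:
--     """Analyze CSS file for performance and best practices."""
--     errors = []
--     warnings = []
--     optimizations = []
--
--     # Check for duplicate properties
--     lines = content.split('\n')
--     properties_in_rule = []
--
--     for line in lines:
--         if '{' in line:
--             properties_in_rule = []
--         elif '}' in line:
--             # Check for duplicates
--             if len(properties_in_rule) != len(set(properties_in_rule)):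
--                 warnings.append("Duplicate CSS properties found")
--             properties_in_rule = []
--         elif ':' in line:
--             prop = line.split(':')[0].strip()
--             properties_in_rule.append(prop)
--
--     return {"errors": errors, "warnings": warnings, "optimizations": optimizations}
-- ===== SOURCE B (Python) =====
-- def _analyze_css_file(content: str, file_path: str):
--     """Analyze CSS file for performance and best practices.
--
--     Two phases: segment the lines into closed rule-blocks of property names,
--     then flag each block containing an early-exit-detected duplicate.
--     """
--     blocks = []
--     current = []
--     for line in content.split('\n'):
--         if '{' in line:
--             current = []
--         elif '}' in line:
--             blocks.append(current)
--             current = []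
--         elif ':' in line:
--             current.append(line.split(':')[0].strip())
--
--     def has_duplicate(props):
--         seen = set()
--         for p in props:
--             if p in seen:
--                 return True
--             seen.add(p)
--         return False
--
--     warnings = ["Duplicate CSS properties found" for b in blocks if has_duplicate(b)]
--     return {"errors": [], "warnings": warnings, "optimizations": []}
-- ===== Notes on version B (the rewrite author's own statement) =====
-- stated objective: alternative
-- what changed: Replaces A's single loop with inline len-vs-set duplicate test per closing brace by a two-phase decomposition: one pass segments lines into closed rule-blocks of property names, a second pass flags each block via an early-exit seen-set scan.
import Mathlib
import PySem

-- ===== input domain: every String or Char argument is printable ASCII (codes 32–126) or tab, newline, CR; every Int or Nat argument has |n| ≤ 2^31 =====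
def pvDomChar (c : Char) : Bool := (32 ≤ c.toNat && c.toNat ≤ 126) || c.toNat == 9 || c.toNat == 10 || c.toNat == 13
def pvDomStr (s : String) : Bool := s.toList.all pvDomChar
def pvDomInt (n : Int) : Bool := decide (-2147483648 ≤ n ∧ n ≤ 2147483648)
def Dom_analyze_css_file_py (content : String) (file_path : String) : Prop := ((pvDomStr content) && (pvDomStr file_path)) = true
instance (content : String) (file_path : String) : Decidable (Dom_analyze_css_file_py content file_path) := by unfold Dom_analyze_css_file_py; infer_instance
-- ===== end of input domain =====

-- B replaces A's inline duplicate bookkeeping by a two-phase decomposition (segment rule blocks,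
-- then flag blocks with an early-exit seen-set duplicate scan); objective: alternative, same cost.

-- ===== PORT A =====
-- line.split(':')[0].strip()  (shared subexpression of both Pythons)
def pvStripProp (line : String) : String :=
  PySem.Str.strip (((PySem.Str.split? line ":").getD []).headI)

-- one iteration of A's for-loop; state = (properties_in_rule, warnings)
def pvStepA (st : List String × List String) (line : String) : List String × List String :=
  if PySem.Str.isIn "{" line then ([], st.2)
  else if PySem.Str.isIn "}" line then
    ([], if st.1.length ≠ (PySem.Set.ofList st.1).length
         then st.2 ++ ["Duplicate CSS properties found"] else st.2)
  else if PySem.Str.isIn ":" line then (st.1 ++ [pvStripProp line], st.2)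
  else st

def analyze_css_file_py (content : String) (file_path : String) : List (String × List String) :=
  let lines := (PySem.Str.split? content "\n").getD []
  let st := lines.foldl pvStepA ([], [])
  [("errors", []), ("warnings", st.2), ("optimizations", [])]

-- ===== PORT B =====
-- phase 1: one iteration of B's segmentation loop; state = (blocks, current)
def pvStepB (st : List (List String) × List String) (line : String) :
    List (List String) × List String :=
  if PySem.Str.isIn "{" line then (st.1, [])
  else if PySem.Str.isIn "}" line then (st.1 ++ [st.2], [])
  else if PySem.Str.isIn ":" line then (st.1, st.2 ++ [pvStripProp line])
  else st

-- phase 2: has_duplicate — early-exit scan with a seen set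
def pvHasDup (seen : PySem.Set String) : List String → Bool
  | [] => false
  | p :: rest =>
    if PySem.Set.contains seen p then true else pvHasDup (PySem.Set.add seen p) rest

def analyze_css_file_py_alt (content : String) (file_path : String) : List (String × List String) :=
  let blocks := (((PySem.Str.split? content "\n").getD []).foldl pvStepB ([], [])).1
  let warnings := (blocks.filter (fun b => pvHasDup PySem.Set.empty b)).map
    (fun _ => "Duplicate CSS properties found")
  [("errors", []), ("warnings", warnings), ("optimizations", [])]

-- ===== PRECONDITION & SPEC =====
def Spec_analyze_css_file_py (content : String) (file_path : String) (out : List (String × List String)) : Prop := out = analyze_css_file_py_alt content file_path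
instance (content : String) (file_path : String) (out : List (String × List String)) : Decidable (Spec_analyze_css_file_py content file_path out) := by unfold Spec_analyze_css_file_py; infer_instance

-- ===== CLAIM (what is proved, stated in full; the proofs are below) =====
def Claim_equal_analyze_css_file_py : Prop := ∀ (content : String) (file_path : String), Dom_analyze_css_file_py content file_path → Spec_analyze_css_file_py content file_path (analyze_css_file_py content file_path)

-- ===== LEMMAS AND PROOFS =====

-- set(xs) keeps a sublist of xs
lemma ofList_sublist (xs : List String) : (PySem.Set.ofList xs).Sublist xs := by
  induction xs using List.reverseRecOn with
  | nil => simp [PySem.Set.ofList_nil]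
  | append_singleton xs x ih =>
    rw [PySem.Set.ofList_append_singleton, PySem.Set.add_eq_ite]
    split
    · exact ih.trans (List.sublist_append_left xs [x])
    · exact ih.append (List.Sublist.refl [x])

-- A's test "len(props) != len(set(props))" decides ¬Nodup
lemma lenTest_iff (xs : List String) :
    (xs.length ≠ (PySem.Set.ofList xs).length) ↔ ¬ xs.Nodup := by
  constructor
  · intro h hnd; exact h (by rw [PySem.Set.ofList_eq_self_of_nodup xs hnd])
  · intro hnd h
    have := (ofList_sublist xs).eq_of_length h.symm
    exact hnd (this ▸ PySem.Set.nodup_ofList xs)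

-- B's early-exit scan returns false exactly on a duplicate-free extension of seen
lemma pvHasDup_false_iff (props : List String) : ∀ (seen : PySem.Set String),
    seen.Nodup → (pvHasDup seen props = false ↔ (seen ++ props).Nodup) := by
  induction props with
  | nil => intro seen hs; simpa [pvHasDup] using hs
  | cons p rest ih =>
    intro seen hs
    by_cases hmem : p ∈ seen
    · have hc : PySem.Set.contains seen p = true := (PySem.Set.contains_iff seen p).mpr hmem
      simp only [pvHasDup, hc, if_true]
      constructor
      · intro h; cases h
      · intro h
        exact absurd (List.mem_cons_self ..) (List.disjoint_of_nodup_append h hmem)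
    · have hc : PySem.Set.contains seen p = false := by
        cases hcc : PySem.Set.contains seen p
        · rfl
        · exact absurd ((PySem.Set.contains_iff seen p).mp hcc) hmem
      have hadd : PySem.Set.add seen p = seen ++ [p] := by
        rw [PySem.Set.add_eq_ite]; exact if_neg hmem
      have hnd : (seen ++ [p]).Nodup := by
        rw [List.nodup_append]
        exact ⟨hs, List.nodup_singleton p, fun a ha b hb h => by subst h; simp at hb; exact hmem (hb ▸ ha)⟩
      simp only [pvHasDup, hc, Bool.false_eq_true, ite_false, hadd]
      rw [ih (seen ++ [p]) hnd, List.append_assoc, List.singleton_append]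

-- the two duplicate tests agree
lemma dup_test_eq (xs : List String) :
    (decide (xs.length ≠ (PySem.Set.ofList xs).length)) = pvHasDup PySem.Set.empty xs := by
  have hiff := pvHasDup_false_iff xs PySem.Set.empty List.nodup_nil
  rw [show ((PySem.Set.empty : PySem.Set String) ++ xs) = xs from rfl] at hiff
  cases h : pvHasDup PySem.Set.empty xs
  · simp [lenTest_iff, hiff.mp h]
  · have : ¬ xs.Nodup := fun hn => by rw [hiff.mpr hn] at h; cases h
    simp [lenTest_iff, this]

-- warnings produced from a recorded block list
def pvWarnOf (bs : List (List String)) : List String :=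
  (bs.filter (fun b => pvHasDup PySem.Set.empty b)).map (fun _ => "Duplicate CSS properties found")

lemma pvWarnOf_cons (b : List String) (bs : List (List String)) :
    pvWarnOf (b :: bs) =
      (if pvHasDup PySem.Set.empty b then ["Duplicate CSS properties found"] else []) ++ pvWarnOf bs := by
  simp only [pvWarnOf, List.filter_cons]
  split <;> simp_all

-- B's blocks accumulator is append-only
lemma stepB_blocks_append (lines : List String) : ∀ (blocks : List (List String)) (cur : List String),
    (lines.foldl pvStepB (blocks, cur)).1 = blocks ++ (lines.foldl pvStepB ([], cur)).1 := by
  induction lines with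
  | nil => intro blocks cur; simp
  | cons line rest ih =>
    intro blocks cur
    simp only [List.foldl_cons, pvStepB]
    split
    · exact ih blocks []
    · split
      · rw [ih (blocks ++ [cur]) [], ih ([] ++ [cur]) []]
        simp
      · split
        · exact ih blocks (cur ++ [pvStripProp line])
        · exact ih blocks cur

-- main loop invariant: A's warnings = prior warnings ++ warnings of B's recorded blocks
lemma loop_eq (lines : List String) : ∀ (props ws : List String),
    (lines.foldl pvStepA (props, ws)).2 = ws ++ pvWarnOf ((lines.foldl pvStepB ([], props)).1) := by
  induction lines with
  | nil => intro props ws; simp [pvWarnOf]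
  | cons line rest ih =>
    intro props ws
    simp only [List.foldl_cons, pvStepA, pvStepB]
    split
    · exact ih [] ws
    · split
      · rw [ih [] _, List.nil_append, stepB_blocks_append rest [props] [], List.singleton_append,
            pvWarnOf_cons, ← dup_test_eq props]
        by_cases hd : props.length ≠ (PySem.Set.ofList props).length
        · simp [hd]
        · simp [hd]
      · split
        · exact ih (props ++ [pvStripProp line]) ws
        · exact ih props ws

-- ===== VERDICT (by name: the statement is the Claim_ definition above) =====
theorem analyze_css_file_py_spec : Claim_equal_analyze_css_file_py := by
  intro content file_path _
  unfold Spec_analyze_css_file_py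
  simp only [analyze_css_file_py, analyze_css_file_py_alt]
  rw [loop_eq ((PySem.Str.split? content "\n").getD []) [] []]
  simp [pvWarnOf]
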